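-- pv_equiv track=rewrite | github.com/s-ilioukhina/tetris-genetic-algorithm | main.py | longestDiagonal
-- ===== SOURCE A (Python) =====
-- def isWithinGrid(grid, x, y):
-- 	if x >= len(grid) or x < 0 or y >= len(grid[x]) or y < 0:
-- 		return False
-- 	return True
--
-- def longestDiagonal(grid):
-- 	longest = 0
-- 	for x in range(len(grid)):
-- 		for y in range(len(grid[x])):
-- 			length = 0
-- 			dx=dy=0
-- 			while isWithinGrid(grid, x+dx, y+dy) and grid[x+dx][y+dy] == 0:
-- 				length += 1
-- 				dx += 1
-- 				dy += 1
-- 			if length > longest: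
-- 				longest = length
-- 	return longest
-- ===== SOURCE B (Python) =====
-- def longestDiagonal(grid):
--     best = 0
--     prev = []
--     for row in reversed(grid):
--         cur = [(1 + (prev[y + 1] if y + 1 < len(prev) else 0)) if row[y] == 0 else 0
--                for y in range(len(row))]
--         for c in cur:
--             if c > best:
--                 best = c
--         prev = cur
--     return best
-- ===== Notes on version B (the rewrite author's own statement) =====
-- stated objective: faster
-- what changed: Replaces the per-cell while-loop scan of each down-right diagonal with a single bottom-up dynamic programming pass that keeps one dp row (dp[y] = 1 + prev[y+1] when the cell is 0), turning O(N*M*D) into O(N*M).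
import Mathlib
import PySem

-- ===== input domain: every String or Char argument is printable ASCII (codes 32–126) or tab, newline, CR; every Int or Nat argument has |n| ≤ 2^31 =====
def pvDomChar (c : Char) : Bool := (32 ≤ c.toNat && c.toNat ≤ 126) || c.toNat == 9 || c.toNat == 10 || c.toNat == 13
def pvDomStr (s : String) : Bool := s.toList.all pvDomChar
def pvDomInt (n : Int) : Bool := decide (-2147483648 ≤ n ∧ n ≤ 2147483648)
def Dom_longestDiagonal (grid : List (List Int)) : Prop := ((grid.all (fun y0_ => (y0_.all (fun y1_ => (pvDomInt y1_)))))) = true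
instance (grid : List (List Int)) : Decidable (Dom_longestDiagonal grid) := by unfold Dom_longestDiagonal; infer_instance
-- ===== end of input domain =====

-- B replaces A's per-cell while-loop scan of each down-right diagonal by one bottom-up
-- dynamic-programming pass keeping a single dp row (objective: faster, O(N*M) vs O(N*M*D)).

-- ===== PORT A =====
-- literal port of isWithinGrid (the 'or' is short-circuit, but each disjunct is total here:
-- grid[x] is ported as (pyGet? grid x).getD [], which the first two disjuncts guard exactly)
def isWithinGrid (grid : List (List Int)) (x y : Int) : Bool :=
  if x ≥ (grid.length : Int) ∨ x < 0 ∨ y ≥ (((PySem.List.pyGet? grid x).getD []).length : Int) ∨ y < 0 then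
    false
  else
    true

-- termination helper for the while loop: the guard bounds x (the port cites it in decreasing_by)
theorem isWithinGrid_bounds (grid : List (List Int)) (x y : Int)
    (h : isWithinGrid grid x y = true) : 0 ≤ x ∧ x < (grid.length : Int) := by
  unfold isWithinGrid at h
  split_ifs at h with hc
  exact ⟨by omega, by omega⟩

-- the while loop of A, state (length, dx) (dy is always equal to dx in A, so one variable);
-- grid[x+dx][y+dy] is ported with pyGet? and defaults guarded by isWithinGrid
def runLoop (grid : List (List Int)) (x y length dx : Int) : Int :=
  if h : isWithinGrid grid (x + dx) (y + dx) = true ∧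
      (PySem.List.pyGet? ((PySem.List.pyGet? grid (x + dx)).getD []) (y + dx)).getD 1 = 0 then
    runLoop grid x y (length + 1) (dx + 1)
  else
    length
termination_by ((grid.length : Int) - (x + dx)).toNat
decreasing_by
  have hb := isWithinGrid_bounds grid (x + dx) (y + dx) h.1
  omega

def longestDiagonal (grid : List (List Int)) : Int :=
  (List.range grid.length).foldl (fun (longest : Int) (x : Nat) =>
    (List.range (grid.getD x []).length).foldl (fun (longest : Int) (y : Nat) =>
      let length := runLoop grid (x : Int) (y : Int) 0 0
      if length > longest then length else longest) longest) 0

-- ===== PORT B =====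
-- one pass over the rows from the bottom; state = (best, dp row of the row below);
-- cur[y] = 1 + prev[y+1] (0 when out of range) when the cell is 0, else 0
def longestDiagonal_alt (grid : List (List Int)) : Int :=
  (grid.reverse.foldl (fun (st : Int × List Int) row =>
      let cur := (List.range row.length).map
        (fun y => if row.getD y 0 = 0 then 1 + st.2.getD (y + 1) 0 else 0)
      (cur.foldl (fun best c => if c > best then c else best) st.1, cur))
    (0, [])).1

-- ===== PRECONDITION & SPEC =====
def Spec_longestDiagonal (grid : List (List Int)) (out : Int) : Prop := out = longestDiagonal_alt grid
instance (grid : List (List Int)) (out : Int) : Decidable (Spec_longestDiagonal grid out) := by unfold Spec_longestDiagonal; infer_instance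

-- ===== CLAIM (what is proved, stated in full; the proofs are below) =====
def Claim_equal_longestDiagonal : Prop := ∀ (grid : List (List Int)), Dom_longestDiagonal grid → Spec_longestDiagonal grid (longestDiagonal grid)

-- ===== LEMMAS AND PROOFS =====

-- proof-side view of B's reversed fold as structural recursion from the bottom row
def goB : List (List Int) → Int × List Int
  | [] => (0, [])
  | r :: rs =>
      let p := goB rs
      let cur := (List.range r.length).map
        (fun y => if r.getD y 0 = 0 then 1 + p.2.getD (y + 1) 0 else 0)
      (cur.foldl (fun best c => if c > best then c else best) p.1, cur)

theorem alt_eq_goB (grid : List (List Int)) : longestDiagonal_alt grid = (goB grid).1 := by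
  have h : ∀ l : List (List Int),
      l.reverse.foldl (fun (st : Int × List Int) row =>
        let cur := (List.range row.length).map
          (fun y => if row.getD y 0 = 0 then 1 + st.2.getD (y + 1) 0 else 0)
        (cur.foldl (fun best c => if c > best then c else best) st.1, cur)) (0, []) = goB l := by
    intro l
    rw [List.foldl_reverse]
    induction l with
    | nil => rfl
    | cons r rs ih => simp only [List.foldr_cons, ih, goB]
  unfold longestDiagonal_alt
  rw [h]

-- the dp value B computes for absolute cell (i, j)
def dpVal (grid : List (List Int)) (i j : Nat) : Int :=
  ((goB (grid.drop i)).2).getD j 0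

theorem dpVal_of_le (grid : List (List Int)) (i j : Nat) (h : grid.length ≤ i) :
    dpVal grid i j = 0 := by
  unfold dpVal
  rw [List.drop_eq_nil_of_le h]
  simp [goB]

theorem goB_snd_getD (r : List Int) (prev : List Int) (j : Nat) :
    (((List.range r.length).map
        (fun y => if r.getD y 0 = 0 then 1 + prev.getD (y + 1) 0 else 0)).getD j 0)
    = if j < r.length then
        (if r.getD j 0 = 0 then 1 + prev.getD (j + 1) 0 else 0) else 0 := by
  by_cases hj : j < r.length
  · rw [List.getD_eq_getElem _ _ (by simpa using hj)]
    simp [hj]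
  · rw [List.getD_eq_default _ _ (by simpa using hj)]
    simp [hj]

theorem dpVal_step (grid : List (List Int)) (i j : Nat) (hi : i < grid.length) :
    dpVal grid i j = if j < (grid.getD i []).length then
      (if (grid.getD i []).getD j 0 = 0 then 1 + dpVal grid (i + 1) (j + 1) else 0) else 0 := by
  unfold dpVal
  rw [List.drop_eq_getElem_cons hi]
  rw [List.getD_eq_getElem grid [] hi]
  exact goB_snd_getD grid[i] ((goB (grid.drop (i + 1))).2) j

-- characterisation of A's loop test (within grid, cell zero) in Nat coordinates
theorem cond_iff (grid : List (List Int)) (i j : Nat) :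
    (isWithinGrid grid (i : Int) (j : Int) = true ∧
      (PySem.List.pyGet? ((PySem.List.pyGet? grid (i : Int)).getD []) (j : Int)).getD 1 = 0)
    ↔ (i < grid.length ∧ j < (grid.getD i []).length ∧ (grid.getD i []).getD j 0 = 0) := by
  unfold isWithinGrid
  by_cases hi : i < grid.length
  · have hg : PySem.List.pyGet? grid (i : Int) = some grid[i] := by
      simp [pysem, hi]
    have hgd : grid.getD i [] = grid[i] := List.getD_eq_getElem grid [] hi
    rw [hg]
    simp only [Option.getD_some, hgd]
    by_cases hj : j < grid[i].length
    · have hr : PySem.List.pyGet? grid[i] (j : Int) = some grid[i][j] := by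
        simp [pysem, hj]
      rw [hr]
      have hrd : grid[i].getD j 0 = grid[i][j] := List.getD_eq_getElem grid[i] 0 hj
      simp only [Option.getD_some, hrd]
      constructor
      · rintro ⟨-, h2⟩; exact ⟨hi, hj, h2⟩
      · rintro ⟨-, -, h3⟩
        refine ⟨?_, h3⟩
        split_ifs with hc
        · exfalso
          rcases hc with hc | hc | hc | hc <;> omega
        · rfl
    · constructor
      · rintro ⟨h1, -⟩
        split_ifs at h1 with hc
        exact absurd (show j < grid[i].length by omega) hj
      · rintro ⟨-, hj2, -⟩; exact absurd hj2 hj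
  · constructor
    · rintro ⟨h1, -⟩
      split_ifs at h1 with hc
      exact absurd (show i < grid.length by omega) hi
    · rintro ⟨hi2, -⟩; exact absurd hi2 hi

-- A's while loop computes length + (B's dp value at (x+d, y+d))
theorem runLoop_eq_dpVal (grid : List (List Int)) :
    ∀ (fuel x y d : Nat) (length : Int), grid.length - (x + d) ≤ fuel →
      runLoop grid (x : Int) (y : Int) length (d : Int)
        = length + dpVal grid (x + d) (y + d) := by
  intro fuel
  induction fuel with
  | zero =>
    intro x y d length hf
    rw [runLoop, dpVal_of_le grid _ _ (by omega), dif_neg]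
    · ring
    · intro hcond
      rw [show (x : Int) + (d : Int) = ((x + d : Nat) : Int) by push_cast; ring,
          show (y : Int) + (d : Int) = ((y + d : Nat) : Int) by push_cast; ring] at hcond
      have := (cond_iff grid (x + d) (y + d)).mp hcond
      omega
  | succ fuel ih =>
    intro x y d length hf
    rw [runLoop]
    rw [show (x : Int) + (d : Int) = ((x + d : Nat) : Int) by push_cast; ring,
        show (y : Int) + (d : Int) = ((y + d : Nat) : Int) by push_cast; ring]
    by_cases hC : (x + d) < grid.length ∧ (y + d) < (grid.getD (x + d) []).length ∧
        (grid.getD (x + d) []).getD (y + d) 0 = 0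
    · rw [dif_pos ((cond_iff grid (x + d) (y + d)).mpr hC)]
      rw [show (d : Int) + 1 = ((d + 1 : Nat) : Int) by push_cast; ring]
      rw [ih x y (d + 1) (length + 1) (by omega)]
      rw [dpVal_step grid (x + d) (y + d) hC.1, if_pos hC.2.1, if_pos hC.2.2]
      have h1 : x + (d + 1) = x + d + 1 := by omega
      have h2 : y + (d + 1) = y + d + 1 := by omega
      rw [h1, h2]
      ring
    · rw [dif_neg (fun hcond => hC ((cond_iff grid (x + d) (y + d)).mp hcond))]
      by_cases hx : x + d < grid.length
      · rw [dpVal_step grid (x + d) (y + d) hx]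
        split_ifs with h1 h2
        · exact absurd ⟨hx, h1, h2⟩ hC
        · ring
        · ring
      · rw [dpVal_of_le grid _ _ (by omega)]
        ring

theorem step_eq_max : (fun (best c : Int) => if c > best then c else best) = max := by
  funext a c
  rw [max_def]
  split_ifs <;> omega

theorem foldl_max_max : ∀ (l : List Int) (a b : Int),
    l.foldl max (max a b) = max a (l.foldl max b) := by
  intro l
  induction l with
  | nil => intro a b; simp
  | cons c t ih =>
    intro a b
    simp only [List.foldl_cons]
    rw [max_assoc]
    exact ih a (max b c)

theorem goB_fst_nonneg : ∀ l : List (List Int), 0 ≤ (goB l).1 := by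
  intro l
  induction l with
  | nil => simp [goB]
  | cons r rs ih =>
    simp only [goB]
    rw [step_eq_max]
    exact le_trans ih (PySem.List.le_foldl_max _ _).1

-- A's inner fold over a row, rewritten as B's fold over the dp row
theorem inner_fold : ∀ (l : List Int) (f : Nat → Int) (acc : Int),
    (∀ y, y < l.length → f y = l.getD y 0) →
    (List.range l.length).foldl (fun a y => if f y > a then f y else a) acc
      = l.foldl (fun best c => if c > best then c else best) acc := by
  intro l
  induction l with
  | nil => intro f acc h; simp
  | cons v vs ih =>
    intro f acc h
    rw [List.length_cons, List.range_succ_eq_map, List.foldl_cons, List.foldl_map]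
    have h0 : f 0 = v := by simpa using h 0 (by simp)
    rw [h0]
    exact ih (fun y => f (y + 1)) _
      (fun y hy => by simpa using h (y + 1) (by simpa using hy))

-- A's outer fold from row k equals the running max of B's pass over rows k..end
theorem outer_fold (grid : List (List Int)) :
    ∀ (n k : Nat) (acc : Int), k + n = grid.length → 0 ≤ acc →
      (List.range' k n).foldl (fun (longest : Int) (x : Nat) =>
        (List.range (grid.getD x []).length).foldl (fun (longest : Int) (y : Nat) =>
          let length := runLoop grid (x : Int) (y : Int) 0 0
          if length > longest then length else longest) longest) acc
      = max acc (goB (grid.drop k)).1 := by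
  intro n
  induction n with
  | zero =>
    intro k acc hk hacc
    rw [show k = grid.length by omega, List.drop_length]
    simp only [List.range'_zero, List.foldl_nil, goB]
    exact (max_eq_left hacc).symm
  | succ n ih =>
    intro k acc hk hacc
    have hklt : k < grid.length := by omega
    simp only [List.range'_succ, List.foldl_cons]
    have hcons : grid.drop k = grid[k] :: grid.drop (k + 1) := List.drop_eq_getElem_cons hklt
    have hgd : grid.getD k [] = grid[k] := List.getD_eq_getElem grid [] hklt
    set prev := (goB (grid.drop (k + 1))).2 with hprev
    set cur := (List.range grid[k].length).map
      (fun y => if grid[k].getD y 0 = 0 then 1 + prev.getD (y + 1) 0 else 0) with hcur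
    have hsnd : (goB (grid.drop k)).2 = cur := by
      rw [hcons]; simp only [goB]; rw [hcur, hprev]
    have hlen : cur.length = grid[k].length := by
      rw [hcur]; simp
    have hinner : (List.range (grid.getD k []).length).foldl (fun (longest : Int) (y : Nat) =>
        if runLoop grid (k : Int) (y : Int) 0 0 > longest then runLoop grid (k : Int) (y : Int) 0 0
        else longest) acc
        = cur.foldl (fun best c => if c > best then c else best) acc := by
      rw [hgd, ← hlen]
      exact inner_fold cur (fun y => runLoop grid (k : Int) (y : Int) 0 0) acc
        (fun y hy => by
          show runLoop grid (k : Int) (y : Int) 0 0 = cur.getD y 0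
          have h1 := runLoop_eq_dpVal grid grid.length k y 0 0 (by omega)
          simp only [Nat.cast_zero, Nat.add_zero, zero_add] at h1
          rw [h1]
          unfold dpVal
          rw [hsnd])
    rw [hinner, step_eq_max]
    have hacc2 : 0 ≤ cur.foldl max acc := le_trans hacc (PySem.List.le_foldl_max cur acc).1
    rw [ih (k + 1) (cur.foldl max acc) (by omega) hacc2]
    have hfst : (goB (grid.drop k)).1 = cur.foldl max (goB (grid.drop (k + 1))).1 := by
      rw [hcons]; simp only [goB]; rw [step_eq_max]
    rw [hfst]
    calc max (cur.foldl max acc) (goB (grid.drop (k + 1))).1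
        = cur.foldl max (max (goB (grid.drop (k + 1))).1 acc) := by
          rw [max_comm]; exact (foldl_max_max cur _ acc).symm
      _ = max acc (cur.foldl max (goB (grid.drop (k + 1))).1) := by
          rw [max_comm ((goB (grid.drop (k + 1))).1) acc]
          exact foldl_max_max cur acc _

-- ===== VERDICT (by name: the statement is the Claim_ definition above) =====
theorem longestDiagonal_spec : Claim_equal_longestDiagonal := by
  intro grid _
  unfold Spec_longestDiagonal longestDiagonal
  rw [List.range_eq_range', alt_eq_goB]
  have h := outer_fold grid grid.length 0 0 (by omega) le_rfl
  rw [List.drop_zero] at h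
  rw [h]
  exact max_eq_right (goB_fst_nonneg grid)
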